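-- pv_equiv track=rewrite | github.com/Chrisaor/StudyPython | Codefights/5.ShapeArea.py | shapeArea
-- ===== SOURCE A (Python) =====
-- def shapeArea(n):
--     answer = 1
--     if n == 1:
--         return 1
--     else:
--         for i in range(1,n):
--             answer += 4*i
--     return answer
-- ===== SOURCE B (Python) =====
-- def shapeArea(n):
--     if n < 1:
--         return 1
--     return 2 * n * (n - 1) + 1
-- ===== Notes on version B (the rewrite author's own statement) =====
-- stated objective: faster
-- what changed: Replaced the O(n) accumulation loop over range(1,n) by the closed form 2n(n-1)+1 (with 1 for n<1, where A's loop is empty).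
import Mathlib
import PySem

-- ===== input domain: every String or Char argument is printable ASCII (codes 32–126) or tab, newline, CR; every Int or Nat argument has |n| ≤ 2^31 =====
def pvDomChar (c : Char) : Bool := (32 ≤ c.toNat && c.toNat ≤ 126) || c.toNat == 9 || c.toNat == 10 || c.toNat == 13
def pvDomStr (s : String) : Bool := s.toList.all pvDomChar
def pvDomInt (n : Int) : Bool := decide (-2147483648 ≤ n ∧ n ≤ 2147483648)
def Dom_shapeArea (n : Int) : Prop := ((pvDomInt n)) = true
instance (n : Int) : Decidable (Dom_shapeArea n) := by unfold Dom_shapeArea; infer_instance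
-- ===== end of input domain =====

-- B replaces A's O(n) accumulation loop by the closed form 2n(n-1)+1 (objective: faster, asymptotic).


-- ===== PORT A =====
def shapeArea (n : Int) : Int :=
  let answer : Int := 1
  if n == 1 then 1
  else (PySem.List.pyRange 1 n 1).foldl (fun a i => a + 4 * i) answer

-- ===== PORT B =====
def shapeArea_alt (n : Int) : Int :=
  if n < 1 then 1
  else 2 * n * (n - 1) + 1

-- ===== PRECONDITION & SPEC =====
def Spec_shapeArea (n : Int) (out : Int) : Prop := out = shapeArea_alt n
instance (n : Int) (out : Int) : Decidable (Spec_shapeArea n out) := by unfold Spec_shapeArea; infer_instance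

-- ===== CLAIM (what is proved, stated in full; the proofs are below) =====
def Claim_equal_shapeArea : Prop := ∀ (n : Int), Dom_shapeArea n → Spec_shapeArea n (shapeArea n)

-- ===== LEMMAS AND PROOFS =====

-- A's loop over range(1, 1+m) computes the closed form.
theorem shapeArea_foldl_closed (m : Nat) :
    (PySem.List.pyRange 1 (1 + (m : Int)) 1).foldl (fun a i => a + 4 * i) 1
      = 2 * (1 + (m : Int)) * ((1 + (m : Int)) - 1) + 1 := by
  induction m with
  | zero => simp [PySem.List.pyRange_one_eq_nil]
  | succ k ih =>
      have h : (1 : Int) ≤ 1 + (k : Int) := by omega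
      have : (1 + ((k + 1 : Nat) : Int)) = (1 + (k : Int)) + 1 := by push_cast; ring
      rw [this, PySem.List.pyRange_one_succ_right h, List.foldl_append, ih]
      simp [List.foldl]
      ring

theorem shapeArea_spec' (n : Int) : shapeArea n = shapeArea_alt n := by
  unfold shapeArea shapeArea_alt
  by_cases h1 : n < 1
  · have hne : ¬ (n == 1) = true := by simp; omega
    rw [if_neg hne, PySem.List.pyRange_one_eq_nil (by omega : n ≤ 1), if_pos h1]
    rfl
  · by_cases h2 : n = 1
    · subst h2; norm_num
    · have hn : 1 ≤ n := by omega
      obtain ⟨m, hm⟩ : ∃ m : Nat, n = 1 + (m : Int) := ⟨(n - 1).toNat, by omega⟩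
      have : ¬ (n == 1) = true := by simp [h2]
      rw [if_neg this]
      rw [if_neg h1, hm, shapeArea_foldl_closed]

-- ===== VERDICT (by name: the statement is the Claim_ definition above) =====
theorem shapeArea_spec : Claim_equal_shapeArea := by
  intro n _
  exact shapeArea_spec' n
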